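-- pv_equiv track=rewrite | github.com/jingxincurry/Leetcode_recording | two_pointers/lc3649_count_perfect_pairs.py | perfectPairs
-- ===== SOURCE A (Python) =====
-- from typing import List
--
-- def perfectPairs(nums: List[int]) -> int:
--     for i, x in enumerate(nums):
--         nums[i] = abs(x)
--     nums.sort()
--     left = 0
--     count = 0
--     for j,b in enumerate(nums):
--         while abs(nums[left]) * 2 < abs(b):
--             left += 1
--         count += j - left
--     return count
-- ===== SOURCE B (Python) =====
-- from typing import List
--
-- def perfectPairs(nums: List[int]) -> int:
--     # Same in-place transformation as the original: abs then sort.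
--     for i, x in enumerate(nums):
--         nums[i] = abs(x)
--     nums.sort()
--     count = 0
--     for j, b in enumerate(nums):
--         # first index in [0, j) whose value is >= ceil(b / 2), by binary search
--         x = (b + 1) // 2
--         lo, hi = 0, j
--         while lo < hi:
--             mid = (lo + hi) // 2
--             if nums[mid] < x:
--                 lo = mid + 1
--             else:
--                 hi = mid
--         count += j - lo
--     return count
-- ===== Notes on version B (the rewrite author's own statement) =====
-- stated objective: alternative
-- what changed: The forward two-pointer sweep with a shared 'left' cursor is replaced by an independent binary search per element: for each j it finds the first index with value >= ceil(nums[j]/2) in [0, j) and adds j minus that index.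
import Mathlib
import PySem

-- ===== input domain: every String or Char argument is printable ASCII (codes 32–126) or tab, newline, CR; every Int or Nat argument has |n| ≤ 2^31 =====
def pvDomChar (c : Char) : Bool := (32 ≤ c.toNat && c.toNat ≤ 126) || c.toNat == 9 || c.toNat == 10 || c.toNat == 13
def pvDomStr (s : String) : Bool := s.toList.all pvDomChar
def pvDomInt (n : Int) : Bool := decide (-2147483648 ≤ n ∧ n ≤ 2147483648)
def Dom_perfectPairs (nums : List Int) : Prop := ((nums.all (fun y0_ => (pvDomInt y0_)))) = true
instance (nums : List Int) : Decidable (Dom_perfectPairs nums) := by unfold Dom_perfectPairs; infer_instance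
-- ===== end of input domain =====

-- B replaces A's shared two-pointer sweep by an independent binary search per element
-- (alternative decomposition, same asymptotic cost).  Both A and B mutate their argument
-- identically (abs of each entry, then sort); the equivalence proved here is about the
-- RETURN value.

-- ===== PORT A =====
-- the inner `while abs(nums[left]) * 2 < abs(b): left += 1`.
-- Fuel-bounded recursion only to make the loop structurally total; with fuel = len+1 it is
-- exact on every list reaching it (the loop state always stays in range: the list is sorted
-- and non-negative at that point, so the condition fails at left = j at the latest).
-- pyGetD is exact here for the same reason (the index is always in range when read).
def pvWhileA (s : List Int) (b : Int) (left : Nat) (fuel : Nat) : Nat :=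
  match fuel with
  | 0 => left
  | f + 1 =>
    if |PySem.List.pyGetD s (left : Int) 0| * 2 < |b| then pvWhileA s b (left + 1) f
    else left

def perfectPairs (nums : List Int) : Int :=
  let s := PySem.List.sorted (nums.map (fun x => |x|)) (fun x => x) false
  let r := (PySem.List.enumerate s 0).foldl
    (fun (st : Nat × Int) jb =>
      let left := pvWhileA s jb.2 st.1 (s.length + 1)
      (left, st.2 + jb.1 - (left : Int)))
    (0, 0)
  r.2

-- ===== PORT B =====
-- hand-written bisect_left from Source B: while lo < hi: mid = (lo+hi)//2; …
def pvBisect (s : List Int) (x : Int) (lo hi : Int) : Int :=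
  if h : lo < hi then
    let mid := PySem.Int.floordiv (lo + hi) 2
    if PySem.List.pyGetD s mid 0 < x then pvBisect s x (mid + 1) hi
    else pvBisect s x lo mid
  else lo
termination_by (hi - lo).toNat
decreasing_by
  · simp only [PySem.Int.floordiv, Int.fdiv_eq_ediv]; omega
  · simp only [PySem.Int.floordiv, Int.fdiv_eq_ediv]; omega

def perfectPairs_alt (nums : List Int) : Int :=
  let s := PySem.List.sorted (nums.map (fun x => |x|)) (fun x => x) false
  (PySem.List.enumerate s 0).foldl
    (fun c jb =>
      c + jb.1 - pvBisect s (PySem.Int.floordiv (jb.2 + 1) 2) 0 jb.1)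
    0

-- ===== PRECONDITION & SPEC =====
def Spec_perfectPairs (nums : List Int) (out : Int) : Prop := out = perfectPairs_alt nums
instance (nums : List Int) (out : Int) : Decidable (Spec_perfectPairs nums out) := by unfold Spec_perfectPairs; infer_instance

-- ===== CLAIM (what is proved, stated in full; the proofs are below) =====
def Claim_equal_perfectPairs : Prop := ∀ (nums : List Int), Dom_perfectPairs nums → Spec_perfectPairs nums (perfectPairs nums)

-- ===== LEMMAS AND PROOFS =====

-- number of elements of s whose double is below b
def pvCnt (s : List Int) (b : Int) : Nat := s.countP (fun a => decide (2 * a < b))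

-- on a sorted list, the predicate 2*a < b holds exactly on the first pvCnt positions
theorem pvCnt_char (s : List Int) (hs : s.Pairwise (· ≤ ·)) (b : Int)
    (l : Nat) (hl : l < s.length) : 2 * s[l] < b ↔ l < pvCnt s b := by
  induction s generalizing l with
  | nil => simp at hl
  | cons a t ih =>
    have hs' : t.Pairwise (· ≤ ·) := hs.tail
    have hat : ∀ x ∈ t, a ≤ x := fun x hx => (List.pairwise_cons.mp hs).1 x hx
    cases l with
    | zero =>
      simp only [List.getElem_cons_zero, pvCnt, List.countP_cons]
      by_cases hpa : 2 * a < b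
      · simp [hpa]
      · have ht0 : t.countP (fun a => decide (2 * a < b)) = 0 := by
          rw [List.countP_eq_zero]
          intro x hx
          have := hat x hx
          simp only [decide_eq_true_eq]; omega
        simp [hpa, ht0]
    | succ l =>
      simp only [List.getElem_cons_succ]
      have hl' : l < t.length := by simpa using hl
      rw [ih hs' l hl']
      simp only [pvCnt, List.countP_cons]
      by_cases hpa : 2 * a < b
      · simp [hpa]
      · have hx : ¬ 2 * t[l] < b := by
          have := hat t[l] (List.getElem_mem hl')
          omega
        have ht0 : t.countP (fun a => decide (2 * a < b)) = 0 := by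
          rw [List.countP_eq_zero]
          intro x hx'
          have := hat x hx'
          simp only [decide_eq_true_eq]; omega
        rw [ih hs' l hl'] at hx
        simp only [pvCnt] at hx ⊢
        simp [hpa, ht0]

theorem pvCnt_le (s : List Int) (hs : s.Pairwise (· ≤ ·)) (hpos : ∀ x ∈ s, 0 ≤ x)
    (j : Nat) (hj : j < s.length) : pvCnt s s[j] ≤ j := by
  by_contra h
  have := (pvCnt_char s hs s[j] j hj).mpr (by omega)
  have := hpos s[j] (List.getElem_mem hj)
  omega

theorem pvCnt_mono (s : List Int) (b b' : Int) (hbb : b ≤ b') : pvCnt s b ≤ pvCnt s b' := by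
  apply List.countP_mono_left
  intro x _ hx
  simp only [decide_eq_true_eq] at hx ⊢
  omega

-- the while loop lands exactly on pvCnt
theorem pvWhileA_eq (s : List Int) (hs : s.Pairwise (· ≤ ·)) (hpos : ∀ x ∈ s, 0 ≤ x)
    (b : Int) (hb : b ∈ s) (hcb : pvCnt s b < s.length)
    (fuel left : Nat) (hleft : left ≤ pvCnt s b) (hfuel : pvCnt s b - left < fuel) :
    pvWhileA s b left fuel = pvCnt s b := by
  induction fuel generalizing left with
  | zero => omega
  | succ f ih =>
    have hlr : left < s.length := by omega
    have hget : PySem.List.pyGetD s (left : Int) 0 = s[left] := by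
      rw [PySem.List.pyGetD_eq_getElem s 0 (by positivity) (by exact_mod_cast hlr)]
      simp
    have habsl : |s[left]| = s[left] := abs_of_nonneg (hpos _ (List.getElem_mem hlr))
    have habsb : |b| = b := abs_of_nonneg (hpos _ hb)
    rw [pvWhileA, hget, habsl, habsb]
    by_cases hlt : left < pvCnt s b
    · have : 2 * s[left] < b := (pvCnt_char s hs b left hlr).mpr hlt
      rw [if_pos (by omega)]
      exact ih (left + 1) (by omega) (by omega)
    · have hle : left = pvCnt s b := by omega
      have : ¬ 2 * s[left] < b := by
        rw [pvCnt_char s hs b left hlr]; omega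
      rw [if_neg (by omega)]
      omega

-- the binary search lands exactly on the first index whose value is ≥ x
theorem pvBisect_eq (s : List Int) (x : Int) (m : Nat)
    (hchar : ∀ (l : Nat) (hl : l < s.length), (s[l]'hl < x ↔ l < m)) :
    ∀ lo hi : Int, 0 ≤ lo → lo ≤ m → (m : Int) ≤ hi → hi ≤ s.length →
      pvBisect s x lo hi = m := by
  intro lo hi
  induction lo, hi using pvBisect.induct s x with
  | case1 lo hi h mid0 hlt ih =>
    intro h0 hlom hmhi hhin
    set mid := PySem.Int.floordiv (lo + hi) 2 with hmiddef
    have hmid : lo ≤ mid ∧ mid < hi := by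
      simp only [hmiddef, PySem.Int.floordiv, Int.fdiv_eq_ediv]; omega
    have hmr1 : (0:Int) ≤ mid := by omega
    have hmr2 : mid < (s.length : Int) := by omega
    have hget : PySem.List.pyGetD s mid 0 = s[mid.toNat]'(by omega) :=
      PySem.List.pyGetD_eq_getElem s 0 hmr1 hmr2
    have hmlt : mid.toNat < m := (hchar mid.toNat (by omega)).mp (by rw [← hget]; exact hlt)
    rw [pvBisect, dif_pos h, if_pos hlt]
    exact ih (by omega) (by omega) hmhi hhin
  | case2 lo hi h mid0 hge ih =>
    intro h0 hlom hmhi hhin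
    set mid := PySem.Int.floordiv (lo + hi) 2 with hmiddef
    have hmid : lo ≤ mid ∧ mid < hi := by
      simp only [hmiddef, PySem.Int.floordiv, Int.fdiv_eq_ediv]; omega
    have hmr1 : (0:Int) ≤ mid := by omega
    have hmr2 : mid < (s.length : Int) := by omega
    have hget : PySem.List.pyGetD s mid 0 = s[mid.toNat]'(by omega) :=
      PySem.List.pyGetD_eq_getElem s 0 hmr1 hmr2
    have hmge : ¬ mid.toNat < m := fun hm => hge (by rw [hget]; exact (hchar mid.toNat (by omega)).mpr hm)
    rw [pvBisect, dif_pos h, if_neg hge]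
    exact ih h0 hlom (by omega) (by omega)
  | case3 lo hi h =>
    intro h0 hlom hmhi hhin
    rw [pvBisect, dif_neg h]
    omega

-- ceil translation: a < (b+1)//2  ↔  2*a < b
theorem pvCeil_iff (a b : Int) : a < PySem.Int.floordiv (b + 1) 2 ↔ 2 * a < b := by
  simp only [PySem.Int.floordiv, Int.fdiv_eq_ediv]; omega

-- the two folds agree, step by step over the enumerated suffix
theorem pvFold_eq (s : List Int) (hs : s.Pairwise (· ≤ ·)) (hpos : ∀ x ∈ s, 0 ≤ x) :
    ∀ (d : List Int) (k left : Nat) (c : Int),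
      s.drop k = d → (∀ hk : k < s.length, left ≤ pvCnt s (s[k]'hk)) →
      ((PySem.List.enumerate d k).foldl
        (fun (st : Nat × Int) jb =>
          let l' := pvWhileA s jb.2 st.1 (s.length + 1)
          (l', st.2 + jb.1 - (l' : Int))) (left, c)).2
      = (PySem.List.enumerate d k).foldl
        (fun c jb => c + jb.1 - pvBisect s (PySem.Int.floordiv (jb.2 + 1) 2) 0 jb.1) c := by
  intro d
  induction d with
  | nil => intro k left c _ _; simp [PySem.List.enumerate]
  | cons b d' ih =>
    intro k left c hd hleft
    have hk : k < s.length := by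
      by_contra h
      rw [List.drop_eq_nil_of_le (by omega)] at hd
      exact (List.cons_ne_nil b d') hd.symm
    have hb : s[k] = b := by
      have h0 : (s.drop k)[0]? = s[k + 0]? := List.getElem?_drop
      rw [hd] at h0
      simp only [List.getElem?_cons_zero, Nat.add_zero] at h0
      exact (List.getElem?_eq_some_iff.mp h0.symm).2
    have hbmem : b ∈ s := hb ▸ List.getElem_mem hk
    have hcb : pvCnt s b ≤ k := hb ▸ pvCnt_le s hs hpos k hk
    have hwhile : pvWhileA s b left (s.length + 1) = pvCnt s b := by
      apply pvWhileA_eq s hs hpos b hbmem (by omega) _ _ (hb ▸ hleft hk) (by omega)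
    have hbis : pvBisect s (PySem.Int.floordiv (b + 1) 2) 0 (k : Int) = (pvCnt s b : Int) := by
      apply pvBisect_eq s _ (pvCnt s b)
      · intro l hl
        rw [pvCeil_iff, pvCnt_char s hs b l hl]
      · omega
      · omega
      · exact_mod_cast hcb
      · exact_mod_cast Nat.le_of_lt hk
    rw [PySem.List.enumerate_cons]
    simp only [List.foldl_cons, hwhile, hbis]
    have hd' : s.drop (k + 1) = d' := by
      have := congrArg (List.drop 1) hd
      simpa [List.drop_drop, Nat.add_comm] using this
    have hcast : ((k : Int) + 1) = ((k + 1 : Nat) : Int) := by push_cast; ring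
    rw [hcast]
    apply ih (k + 1) (pvCnt s b) _ hd'
    intro hk1
    rw [← hb]
    apply pvCnt_mono
    exact (List.pairwise_iff_getElem.mp hs) k (k + 1) hk hk1 (by omega)

-- ===== VERDICT (by name: the statement is the Claim_ definition above) =====
theorem perfectPairs_spec : Claim_equal_perfectPairs := by
  intro nums _
  unfold Spec_perfectPairs perfectPairs perfectPairs_alt
  set s := PySem.List.sorted (nums.map (fun x => |x|)) (fun x => x) false with hsdef
  have hs : s.Pairwise (· ≤ ·) := PySem.List.sorted_pairwise (nums.map (fun x => |x|)) (fun x => x)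
  have hpos : ∀ x ∈ s, 0 ≤ x := by
    intro x hx
    rw [PySem.List.mem_sorted] at hx
    obtain ⟨y, _, rfl⟩ := List.mem_map.mp hx
    exact abs_nonneg y
  have := pvFold_eq s hs hpos s 0 0 0 (by simp) (by intro h; simp [pvCnt])
  simpa using this
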